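-- pv_equiv track=rewrite | github.com/YuemingJin/MTRCNet-CL | pytorch1.2.0/test_singlenet_tool.py | get_useful_start_idx
-- ===== SOURCE A (Python) =====
-- def get_useful_start_idx(sequence_length, list_each_length):
--     count = 0
--     idx = []
--     for i in range(len(list_each_length)):
--         for j in range(count, count + (list_each_length[i] + 1 - sequence_length)):
--             idx.append(j)
--         count += list_each_length[i]
--     return idx
-- ===== SOURCE B (Python) =====
-- def get_useful_start_idx(sequence_length, list_each_length):
--     # Divide and conquer: solve each half of the segment list recursively,
--     # producing indices relative to that half's own start together with the
--     # half's total length, then merge by shifting the right half's indices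
--     # by the left half's total length. No running offset is ever threaded.
--     def solve(lo, hi):
--         if hi - lo == 0:
--             return [], 0
--         if hi - lo == 1:
--             L = list_each_length[lo]
--             return list(range(L + 1 - sequence_length)), L
--         mid = (lo + hi) // 2
--         left, ltot = solve(lo, mid)
--         right, rtot = solve(mid, hi)
--         return left + [j + ltot for j in right], ltot + rtot
--     return solve(0, len(list_each_length))[0]
-- ===== Notes on version B (the rewrite author's own statement) =====
-- stated objective: alternative
-- what changed: B replaces A's forward sweep with a threaded running count by a divide-and-conquer recursion: each half of the segment list is solved independently into indices relative to its own start plus its total length, and halves are merged by shifting the right half's indices by the left half's total length.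
import Mathlib
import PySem

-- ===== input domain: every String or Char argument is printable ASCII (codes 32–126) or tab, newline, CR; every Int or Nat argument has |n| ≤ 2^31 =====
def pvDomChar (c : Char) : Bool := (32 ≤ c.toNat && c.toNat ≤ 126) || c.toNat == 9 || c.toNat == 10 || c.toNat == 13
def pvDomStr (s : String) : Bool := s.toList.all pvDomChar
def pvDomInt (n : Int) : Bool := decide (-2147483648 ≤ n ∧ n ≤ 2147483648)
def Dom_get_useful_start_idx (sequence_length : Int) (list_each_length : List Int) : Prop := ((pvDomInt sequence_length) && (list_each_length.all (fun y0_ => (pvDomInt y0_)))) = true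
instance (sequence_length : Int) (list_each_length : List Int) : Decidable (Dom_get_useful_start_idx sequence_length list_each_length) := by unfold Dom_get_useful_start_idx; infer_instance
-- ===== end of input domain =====

-- B solves the segment list by divide and conquer (each half relative to its own
-- start, merged by shifting the right half by the left half's total length) instead
-- of A's forward nested loops with a running count; same return value.

-- ===== PORT A =====
-- A: forward nested loops threading the state (count, idx) through the segments.
def get_useful_start_idx (sequence_length : Int) (list_each_length : List Int) : List Int :=
  (list_each_length.foldl
    (fun (st : Int × List Int) L =>
      (st.1 + L, st.2 ++ PySem.List.pyRange st.1 (st.1 + (L + 1 - sequence_length)) 1))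
    (0, [])).2

-- ===== PORT B =====
-- solve(lo, hi): indices relative to segment lo's base, together with the total length
-- of segments lo..hi-1.  list_each_length[lo] is only read with lo < len (solve is
-- called with 0 ≤ lo < hi ≤ len), so the natural-index getD is exact there.
def pvSolveB (sequence_length : Int) (list_each_length : List Int) (lo hi : Nat) :
    List Int × Int :=
  if hi - lo = 0 then ([], 0)
  else if hi - lo = 1 then
    let L := list_each_length.getD lo 0
    (PySem.List.pyRange 0 (L + 1 - sequence_length) 1, L)
  else
    let mid := (lo + hi) / 2
    let l := pvSolveB sequence_length list_each_length lo mid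
    let r := pvSolveB sequence_length list_each_length mid hi
    (l.1 ++ r.1.map (fun j => j + l.2), l.2 + r.2)
termination_by hi - lo
decreasing_by all_goals omega

def get_useful_start_idx_alt (sequence_length : Int) (list_each_length : List Int) : List Int :=
  (pvSolveB sequence_length list_each_length 0 list_each_length.length).1

-- ===== PRECONDITION & SPEC =====
def Spec_get_useful_start_idx (sequence_length : Int) (list_each_length : List Int) (out : List Int) : Prop := out = get_useful_start_idx_alt sequence_length list_each_length
instance (sequence_length : Int) (list_each_length : List Int) (out : List Int) : Decidable (Spec_get_useful_start_idx sequence_length list_each_length out) := by unfold Spec_get_useful_start_idx; infer_instance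

-- ===== CLAIM =====
def Claim_equal_get_useful_start_idx : Prop := ∀ (sequence_length : Int) (list_each_length : List Int), Dom_get_useful_start_idx sequence_length list_each_length → Spec_get_useful_start_idx sequence_length list_each_length (get_useful_start_idx sequence_length list_each_length)

-- ===== LEMMAS AND PROOFS =====

-- reference: the per-segment ranges relative to offset 0
def pvRel (sequence_length : Int) : List Int → List Int
  | [] => []
  | L :: ls =>
      PySem.List.pyRange 0 (L + 1 - sequence_length) 1 ++
        (pvRel sequence_length ls).map (fun j => j + L)

-- reference: the per-segment ranges starting from offset c (A's shape)
def pvRanges (sequence_length c : Int) : List Int → List Int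
  | [] => []
  | L :: ls =>
      PySem.List.pyRange c (c + (L + 1 - sequence_length)) 1 ++ pvRanges sequence_length (c + L) ls

theorem pyRange_shift (c n : Int) :
    (PySem.List.pyRange 0 n 1).map (fun j => j + c) = PySem.List.pyRange c (c + n) 1 := by
  rw [PySem.List.pyRange_one, PySem.List.pyRange_one]
  have h : c + n - c = n - 0 := by ring
  rw [h, List.map_map]
  exact List.map_congr_left (fun k _ => by simp; ring)

theorem pvRel_shift (seq : Int) (ls : List Int) : ∀ c : Int,
    (pvRel seq ls).map (fun j => j + c) = pvRanges seq c ls := by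
  induction ls with
  | nil => intro c; simp [pvRel, pvRanges]
  | cons L ls ih =>
      intro c
      simp only [pvRel, List.map_append, List.map_map, pvRanges]
      congr 1
      · exact pyRange_shift c (L + 1 - seq)
      · have h : ((fun j => j + c) ∘ fun j => j + L) = fun j => j + (c + L) := by
          funext j; simp; ring
        rw [h]
        exact ih (c + L)

theorem pvRel_append (seq : Int) (xs ys : List Int) :
    pvRel seq (xs ++ ys) = pvRel seq xs ++ (pvRel seq ys).map (fun j => j + xs.sum) := by
  induction xs with
  | nil => simp [pvRel]
  | cons L xs ih =>
      simp only [List.cons_append, pvRel, ih, List.map_append, List.map_map,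
        List.append_assoc, List.sum_cons]
      congr 3
      funext j; simp; ring

theorem foldA_eq_ranges (seq : Int) (ls : List Int) : ∀ (c : Int) (acc : List Int),
    (ls.foldl
      (fun (st : Int × List Int) L =>
        (st.1 + L, st.2 ++ PySem.List.pyRange st.1 (st.1 + (L + 1 - seq)) 1))
      (c, acc)).2 = acc ++ pvRanges seq c ls := by
  induction ls with
  | nil => intro c acc; simp [pvRanges]
  | cons L ls ih =>
      intro c acc
      simp only [List.foldl_cons, pvRanges, ih (c + L), List.append_assoc]

theorem pvSolveB_eq (seq : Int) (ls : List Int) : ∀ (lo hi : Nat), lo ≤ hi → hi ≤ ls.length →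
    pvSolveB seq ls lo hi =
      (pvRel seq ((ls.drop lo).take (hi - lo)), ((ls.drop lo).take (hi - lo)).sum) := by
  suffices h : ∀ (n lo hi : Nat), hi - lo ≤ n → lo ≤ hi → hi ≤ ls.length →
      pvSolveB seq ls lo hi =
        (pvRel seq ((ls.drop lo).take (hi - lo)), ((ls.drop lo).take (hi - lo)).sum) from
    fun lo hi h1 h2 => h (hi - lo) lo hi le_rfl h1 h2
  intro n
  induction n with
  | zero =>
      intro lo hi hle _ _
      have h0 : hi - lo = 0 := Nat.le_zero.mp hle
      rw [pvSolveB]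
      simp [h0, pvRel]
  | succ n ih =>
      intro lo hi hle hlo hhi
      rw [pvSolveB]
      by_cases h0 : hi - lo = 0
      · simp [h0, pvRel]
      · by_cases h1 : hi - lo = 1
        · have hlt : lo < ls.length := by omega
          have hget : ls.getD lo 0 = ls[lo] := List.getD_eq_getElem ls 0 hlt
          have htake : List.take 1 (List.drop lo ls) = [ls.getD lo 0] := by
            rw [List.drop_eq_getElem_cons hlt, List.getD_eq_getElem ls 0 hlt,
              List.take_succ_cons, List.take_zero]
          rw [if_neg h0, if_pos h1, h1, htake]
          simp [pvRel]
        · rw [if_neg h0, if_neg h1]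
          dsimp only
          have hm1 : lo ≤ (lo + hi) / 2 := by omega
          have hm2 : (lo + hi) / 2 ≤ hi := by omega
          generalize hm : (lo + hi) / 2 = mid at *
          have e1 := ih lo mid (by omega) hm1 (le_trans hm2 hhi)
          have e2 := ih mid hi (by omega) hm2 hhi
          rw [e1, e2]
          have hsplit : (ls.drop lo).take (hi - lo) =
              (ls.drop lo).take (mid - lo) ++ (ls.drop mid).take (hi - mid) := by
            have hadd : hi - lo = (mid - lo) + (hi - mid) := by omega
            rw [hadd, List.take_add, List.drop_drop]
            have : lo + (mid - lo) = mid := by omega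
            rw [this]
          rw [hsplit, pvRel_append, List.sum_append]

-- ===== VERDICT =====
theorem get_useful_start_idx_spec : Claim_equal_get_useful_start_idx := by
  intro seq ls _
  show get_useful_start_idx seq ls = get_useful_start_idx_alt seq ls
  rw [get_useful_start_idx, get_useful_start_idx_alt, foldA_eq_ranges seq ls 0 [],
      pvSolveB_eq seq ls 0 ls.length (Nat.zero_le _) le_rfl]
  simpa using (pvRel_shift seq ls 0).symm
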